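-- pv_equiv track=rewrite | github.com/MiguelMurillo23/MineriaComudidadesIndigenas | AI/mineria.py | find_associations
-- ===== SOURCE A (Python) =====
-- import itertools
-- from collections import defaultdict
--
-- def find_associations(data):
--     associations = defaultdict(int)
--
--     for community in data:
--         for i in range(1, len(community['languages'])+1):
--             language_combinations = list(itertools.combinations(community['languages'], i))
--             for combination in language_combinations:
--                 associations[combination] += 1
--
--         for i in range(1, len(community['beliefs'])+1):
--             belief_combinations = list(itertools.combinations(community['beliefs'], i))
--             for combination in belief_combinations:
--                 associations[combination] += 1
--
--     return associations
-- ===== SOURCE B (Python) =====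
-- from collections import defaultdict
--
--
-- def find_associations(data):
--     # Breadth-first subset enumeration: one frontier of (subset, remaining-suffix)
--     # pairs per subset size, instead of independent itertools.combinations calls.
--     associations = defaultdict(int)
--
--     for community in data:
--         for items in (community['languages'], community['beliefs']):
--             frontier = [((), tuple(items))]
--             while frontier:
--                 nxt = []
--                 for prefix, rest in frontier:
--                     while rest:
--                         x, rest = rest[0], rest[1:]
--                         t = prefix + (x,)
--                         associations[t] += 1
--                         nxt.append((t, rest))
--                 frontier = nxt
--     return associations
-- ===== Notes on version B (the rewrite author's own statement) =====
-- stated objective: alternative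
-- what changed: Replaces the per-size itertools.combinations calls with a single breadth-first frontier of (subset, remaining-suffix) pairs that is extended one element per round, producing the same subsets in the same order.
-- outside the precondition, e.g. on find_associations([{'languages': ['a']}]): A raises KeyError, B raises KeyError
import Mathlib
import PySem

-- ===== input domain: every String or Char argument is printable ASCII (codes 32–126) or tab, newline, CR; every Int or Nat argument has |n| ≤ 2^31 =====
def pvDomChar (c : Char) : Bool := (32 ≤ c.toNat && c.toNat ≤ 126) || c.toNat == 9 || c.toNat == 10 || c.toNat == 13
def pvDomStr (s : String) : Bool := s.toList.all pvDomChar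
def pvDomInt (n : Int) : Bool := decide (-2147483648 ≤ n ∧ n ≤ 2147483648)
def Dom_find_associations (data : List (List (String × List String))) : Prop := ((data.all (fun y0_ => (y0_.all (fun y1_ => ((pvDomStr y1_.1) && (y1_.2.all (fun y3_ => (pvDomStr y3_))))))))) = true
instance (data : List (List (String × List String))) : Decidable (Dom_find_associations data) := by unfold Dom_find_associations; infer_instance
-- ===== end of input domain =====

-- B replaces the per-size itertools.combinations calls by one breadth-first frontier of
-- (subset, remaining-suffix) pairs that is extended size by size (objective: alternative, not faster).

-- ===== PORT A =====
-- `associations[combination] += 1` on a defaultdict(int) is Dict.modify _ 0 (· + 1)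
def find_associations (data : List (List (String × List String))) : List (List String × Int) :=
  (data.foldl (fun assoc community =>
    let langs := (PySem.Dict.mk community).getD "languages" []
    let assoc := (PySem.List.pyRange 1 ((langs.length : Int) + 1) 1).foldl (fun assoc i =>
      let language_combinations := PySem.List.combinations langs i.toNat
      language_combinations.foldl (fun a c => a.modify c 0 (· + 1)) assoc) assoc
    let beliefs := (PySem.Dict.mk community).getD "beliefs" []
    (PySem.List.pyRange 1 ((beliefs.length : Int) + 1) 1).foldl (fun assoc i =>
      let belief_combinations := PySem.List.combinations beliefs i.toNat
      belief_combinations.foldl (fun a c => a.modify c 0 (· + 1)) assoc) assoc)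
    PySem.Dict.empty).items

-- ===== PORT B =====
-- inner `while rest:` loop of Source B: bump each one-element extension of `pre`, collect the
-- new (subset, suffix) pairs onto nxt
def pvExpand (assoc : PySem.Dict (List String) Int) (pre rest : List String)
    (nxt : List (List String × List String)) :
    PySem.Dict (List String) Int × List (List String × List String) :=
  match rest with
  | [] => (assoc, nxt)
  | x :: rest' =>
      let t := pre ++ [x]
      pvExpand (assoc.modify t 0 (· + 1)) pre rest' (nxt ++ [(t, rest')])

-- outer `while frontier:` loop of Source B; fuel only makes the recursion structural
-- (items.length + 2 rounds always suffice to empty the frontier)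
def pvLoop (fuel : Nat) (assoc : PySem.Dict (List String) Int)
    (frontier : List (List String × List String)) : PySem.Dict (List String) Int :=
  match fuel with
  | 0 => assoc
  | fuel + 1 =>
      if frontier.isEmpty then assoc
      else
        let st := frontier.foldl (fun st pq => pvExpand st.1 pq.1 pq.2 st.2) (assoc, [])
        pvLoop fuel st.1 st.2

def pvCountSubsets (assoc : PySem.Dict (List String) Int) (items : List String) :
    PySem.Dict (List String) Int :=
  pvLoop (items.length + 2) assoc [([], items)]

def find_associations_alt (data : List (List (String × List String))) : List (List String × Int) :=
  (data.foldl (fun assoc community =>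
    [(PySem.Dict.mk community).getD "languages" [],
     (PySem.Dict.mk community).getD "beliefs" []].foldl pvCountSubsets assoc)
    PySem.Dict.empty).items

-- ===== PRECONDITION & SPEC =====
-- A raises KeyError on a community dict missing the key 'languages' or 'beliefs'; exactly those inputs are excluded.
def Pre_find_associations (data : List (List (String × List String))) : Prop :=
  ∀ community ∈ data, (PySem.Dict.mk community).contains "languages" = true ∧
    (PySem.Dict.mk community).contains "beliefs" = true
instance (data : List (List (String × List String))) : Decidable (Pre_find_associations data) := by
  unfold Pre_find_associations; infer_instance

def pvWitness_find_associations : (List (List (String × List String))) :=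
  [[("languages", ["a", "b"]), ("beliefs", ["x"])]]

def Spec_find_associations (data : List (List (String × List String))) (out : List (List String × Int)) : Prop := out = find_associations_alt data
instance (data : List (List (String × List String))) (out : List (List String × Int)) : Decidable (Spec_find_associations data out) := by unfold Spec_find_associations; infer_instance

-- ===== CLAIM (what is proved, stated in full; the proofs are below) =====
def Claim_equal_find_associations : Prop := ∀ (data : List (List (String × List String))), Dom_find_associations data → Pre_find_associations data → Spec_find_associations data (find_associations data)

-- ===== LEMMAS AND PROOFS =====

-- one bump of the counter dict
def pvBump (a : PySem.Dict (List String) Int) (c : List String) : PySem.Dict (List String) Int :=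
  a.modify c 0 (· + 1)

-- all one-element extensions of a subset `p` by an element of the suffix `l`, with remaining suffixes
def pvExt (p : List String) : List String → List (List String × List String)
  | [] => []
  | x :: r => (p ++ [x], r) :: pvExt p r

-- size-k subsets together with the suffix after the last chosen element
def pvCombR : Nat → List String → List (List String × List String)
  | 0, l => [([], l)]
  | _ + 1, [] => []
  | k + 1, x :: xs =>
      (pvCombR k xs).map (fun pr => (x :: pr.1, pr.2)) ++ pvCombR (k + 1) xs

def pvStep (fr : List (List String × List String)) : List (List String × List String) :=
  fr.flatMap (fun pq => pvExt pq.1 pq.2)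

theorem pvExpand_spec (rest : List String) : ∀ a p nxt,
    pvExpand a p rest nxt = ((pvExt p rest).foldl (fun a pr => pvBump a pr.1) a, nxt ++ pvExt p rest) := by
  induction rest with
  | nil => intro a p nxt; simp [pvExpand, pvExt]
  | cons x r ih => intro a p nxt; simp [pvExpand, pvExt, ih, pvBump]

theorem pvRound_spec (fr : List (List String × List String)) : ∀ a nxt0,
    fr.foldl (fun st pq => pvExpand st.1 pq.1 pq.2 st.2) (a, nxt0) =
      ((pvStep fr).foldl (fun a pr => pvBump a pr.1) a, nxt0 ++ pvStep fr) := by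
  induction fr with
  | nil => intro a nxt0; simp [pvStep]
  | cons pq fr ih =>
      intro a nxt0
      rw [List.foldl_cons, pvExpand_spec, ih]
      simp [pvStep, List.foldl_append, List.append_assoc]

theorem pvExt_eq (p : List String) (l : List String) :
    pvExt p l = (pvCombR 1 l).map (fun pr => (p ++ pr.1, pr.2)) := by
  induction l with
  | nil => simp [pvExt, pvCombR]
  | cons x xs ih => simp [pvExt, pvCombR, ih]

theorem pvStep_combR (l : List String) : ∀ k, pvStep (pvCombR k l) = pvCombR (k + 1) l := by
  induction l with
  | nil =>
      intro k
      cases k with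
      | zero => simp [pvCombR, pvStep, pvExt]
      | succ k => simp [pvCombR, pvStep]
  | cons x xs ih =>
      intro k
      cases k with
      | zero =>
          simp only [pvCombR, pvStep, List.flatMap_cons, List.flatMap_nil, List.append_nil]
          rw [pvExt_eq]
          simp [pvCombR]
      | succ k =>
          simp only [pvCombR, pvStep, List.flatMap_append, List.flatMap_map]
          have h1 : (pvCombR k xs).flatMap
              (fun pr => pvExt (x :: pr.1) pr.2) =
              (pvStep (pvCombR k xs)).map (fun pr => (x :: pr.1, pr.2)) := by
            simp only [pvStep, List.map_flatMap]
            apply List.flatMap_congr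
            intro pr _
            rw [pvExt_eq, pvExt_eq]
            simp [List.map_map, Function.comp_def]
          rw [h1, ih k, ← pvStep, ih (k + 1)]
theorem pvMapFst_combR (l : List String) : ∀ k,
    (pvCombR k l).map Prod.fst = PySem.List.combinations l k := by
  induction l with
  | nil =>
      intro k
      cases k with
      | zero => simp [pvCombR, PySem.List.combinations_zero]
      | succ k => simp [pvCombR, PySem.List.combinations_nil_succ]
  | cons x xs ih =>
      intro k
      cases k with
      | zero => simp [pvCombR, PySem.List.combinations_zero]
      | succ k =>
          simp [pvCombR, PySem.List.combinations_cons_succ, ← ih, List.map_map,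
            Function.comp_def]

theorem pvCombR_nil_iff (l : List String) : ∀ k, pvCombR k l = [] ↔ l.length < k := by
  induction l with
  | nil =>
      intro k
      cases k with
      | zero => simp [pvCombR]
      | succ k => simp [pvCombR]
  | cons x xs ih =>
      intro k
      cases k with
      | zero => simp [pvCombR]
      | succ k =>
          simp only [pvCombR, List.append_eq_nil_iff, List.map_eq_nil_iff, ih, List.length_cons]
          omega

theorem pvLoop_spec : ∀ (m k : Nat) (l : List String) (a : PySem.Dict (List String) Int),
    l.length < k + m →
    pvLoop m a (pvCombR k l) =
      (List.range' (k + 1) (l.length - k)).foldl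
        (fun a i => (PySem.List.combinations l i).foldl pvBump a) a := by
  intro m
  induction m with
  | zero =>
      intro k l a h
      have : l.length - k = 0 := by omega
      simp [pvLoop, this]
  | succ m ih =>
      intro k l a h
      by_cases hne : pvCombR k l = []
      · have : l.length - k = 0 := by
          have := (pvCombR_nil_iff l k).mp hne
          omega
        simp [pvLoop, hne, this]
      · have hk : k ≤ l.length := by
          have := (pvCombR_nil_iff l k).not.mp hne
          omega
        have hempty : (pvCombR k l).isEmpty = false := by
          cases hcl : pvCombR k l with
          | nil => exact absurd hcl hne
          | cons y ys => simp
        rw [pvLoop, hempty]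
        simp only [Bool.false_eq_true, if_false]
        rw [pvRound_spec, List.nil_append, pvStep_combR]
        have hbump : (pvCombR (k + 1) l).foldl (fun a pr => pvBump a pr.1) a =
            (PySem.List.combinations l (k + 1)).foldl pvBump a := by
          rw [← pvMapFst_combR, List.foldl_map]
        rw [hbump, ih (k + 1) l _ (by omega)]
        cases Nat.eq_or_lt_of_le hk with
        | inl heq =>
            have h1 : l.length - k = 0 := by omega
            have h2 : l.length - (k + 1) = 0 := by omega
            have hc : PySem.List.combinations l (k + 1) = [] :=
              PySem.List.combinations_eq_nil_of_length_lt (xs := l) (r := k + 1) (by omega)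
            simp [h1, h2, hc]
        | inr hlt =>
            have h1 : l.length - k = (l.length - (k + 1)) + 1 := by omega
            rw [h1, List.range'_succ, List.foldl_cons]

theorem pvCountSubsets_eq (a : PySem.Dict (List String) Int) (l : List String) :
    pvCountSubsets a l =
      (PySem.List.pyRange 1 ((l.length : Int) + 1) 1).foldl (fun assoc i =>
        (PySem.List.combinations l i.toNat).foldl (fun a c => a.modify c 0 (· + 1)) assoc) a := by
  unfold pvCountSubsets
  have h0 : [(([] : List String), l)] = pvCombR 0 l := by simp [pvCombR]
  rw [h0, pvLoop_spec (l.length + 2) 0 l a (by omega)]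
  rw [PySem.List.pyRange_one]
  have hn : (((l.length : Int) + 1) - 1).toNat = l.length := by omega
  rw [hn, List.range'_eq_map_range, List.foldl_map, List.foldl_map]
  simp only [Nat.sub_zero]
  apply PySem.List.foldl_congr_mem
  intro acc j _
  have hj : ((1 : Int) + (j : Nat)).toNat = 1 + j := by omega
  rw [hj]
  rfl

-- ===== VERDICT (by name: the statement is the Claim_ definition above) =====
theorem find_associations_spec : Claim_equal_find_associations := by
  intro data _ _
  unfold Spec_find_associations find_associations find_associations_alt
  congr 1
  apply PySem.List.foldl_congr_mem
  intro acc c _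
  simp only [List.foldl_cons, List.foldl_nil, pvCountSubsets_eq]
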